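-- pv_equiv track=rewrite | github.com/mammothb/advent-of-code | 2023/python/day11.py | find_expansion
-- ===== SOURCE A (Python) =====
-- def find_expansion(grid: list[list[str]]) -> tuple[int, int]:
--     nr = len(grid)
--     nc = len(grid[0])
--     row = (1 << nr) - 1
--     col = (1 << nc) - 1
--     for i in range(nr):
--         for j in range(nc):
--             if grid[i][j] == "#":
--                 row &= ~(1 << i)
--                 col &= ~(1 << j)
--     return row, col
-- ===== SOURCE B (Python) =====
-- def find_expansion(grid: list[list[str]]) -> tuple[int, int]:
--     nr = len(grid)
--     nc = len(grid[0])
--     row = sum(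
--         1 << i
--         for i in range(nr)
--         if all(grid[i][j] != "#" for j in range(nc))
--     )
--     col = sum(
--         1 << j
--         for j in range(nc)
--         if all(grid[i][j] != "#" for i in range(nr))
--     )
--     return row, col
-- ===== Notes on version B (the rewrite author's own statement) =====
-- stated objective: simpler
-- what changed: Instead of starting from all-ones masks and clearing row/column bits during one combined scan over every cell, B makes two independent passes that directly sum 1<<i over empty rows and 1<<j over empty columns.
import Mathlib
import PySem

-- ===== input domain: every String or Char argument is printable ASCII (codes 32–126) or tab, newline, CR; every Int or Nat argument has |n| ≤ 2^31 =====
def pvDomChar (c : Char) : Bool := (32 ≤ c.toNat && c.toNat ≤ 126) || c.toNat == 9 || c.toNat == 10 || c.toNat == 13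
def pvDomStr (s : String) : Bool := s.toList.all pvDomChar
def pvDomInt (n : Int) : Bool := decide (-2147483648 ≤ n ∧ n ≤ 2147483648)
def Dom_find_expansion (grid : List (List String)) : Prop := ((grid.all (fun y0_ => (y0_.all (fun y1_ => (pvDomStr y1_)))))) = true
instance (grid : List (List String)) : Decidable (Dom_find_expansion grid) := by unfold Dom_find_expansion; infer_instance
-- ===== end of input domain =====

-- B replaces A's single clear-bits-while-scanning walk by two independent passes that sum 1<<i
-- over empty rows and 1<<j over empty columns (objective: simpler decomposition, same cost).

-- shared cell accessor: grid[i][j]; indices produced by range are in bounds under Pre_,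
-- so .getD is exact there (Python raises IndexError outside Pre_)
def pvCell (grid : List (List String)) (i j : Nat) : String := (grid.getD i []).getD j ""

-- ===== PORT A =====
def find_expansion (grid : List (List String)) : Int × Int :=
  let nr := grid.length
  -- nc = len(grid[0]): Python raises IndexError on the empty grid, excluded by Pre_
  let nc := (grid.headD []).length
  -- row/col start as (1 << nr) - 1 and (1 << nc) - 1; the nested loops clear bits.
  -- Python's `x &= ~(1 << k)` on ints is exactly Int.land/Int.lnot (two's-complement bitwise).
  (List.range nr).foldl (fun rc i =>
    (List.range nc).foldl (fun rc j =>
      if pvCell grid i j = "#" then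
        (Int.land rc.1 (Int.lnot ((1:Int) <<< (i:Int))),
         Int.land rc.2 (Int.lnot ((1:Int) <<< (j:Int))))
      else rc) rc)
    (((1:Int) <<< (nr:Int)) - 1, ((1:Int) <<< (nc:Int)) - 1)

-- ===== PORT B =====
def find_expansion_alt (grid : List (List String)) : Int × Int :=
  let nr := grid.length
  let nc := (grid.headD []).length
  -- row = sum(1 << i for i in range(nr) if all(grid[i][j] != '#' for j in range(nc)))
  let row : Int := (((List.range nr).filter (fun i =>
      (List.range nc).all (fun j => pvCell grid i j ≠ "#"))).map
      (fun i => (1:Int) <<< (Int.ofNat i))).foldl (· + ·) 0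
  -- col = sum(1 << j for j in range(nc) if all(grid[i][j] != '#' for i in range(nr)))
  let col : Int := (((List.range nc).filter (fun j =>
      (List.range nr).all (fun i => pvCell grid i j ≠ "#"))).map
      (fun j => (1:Int) <<< (Int.ofNat j))).foldl (· + ·) 0
  (row, col)

-- ===== PRECONDITION & SPEC =====
-- Pre_ excludes exactly the inputs where Python A raises IndexError: the empty grid
-- (grid[0]) and ragged grids with some row shorter than the first (grid[i][j]).
def Pre_find_expansion (grid : List (List String)) : Prop :=
  grid ≠ [] ∧ ∀ r ∈ grid, (grid.headD []).length ≤ r.length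
instance (grid : List (List String)) : Decidable (Pre_find_expansion grid) := by
  unfold Pre_find_expansion; infer_instance

def pvWitness_find_expansion : List (List String) := [["#", "."], [".", "."]]

def Spec_find_expansion (grid : List (List String)) (out : Int × Int) : Prop := out = find_expansion_alt grid
instance (grid : List (List String)) (out : Int × Int) : Decidable (Spec_find_expansion grid out) := by unfold Spec_find_expansion; infer_instance

-- ===== CLAIM (what is proved, stated in full; the proofs are below) =====
def Claim_equal_find_expansion : Prop := ∀ (grid : List (List String)), Dom_find_expansion grid → Pre_find_expansion grid → Spec_find_expansion grid (find_expansion grid)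

-- ===== LEMMAS AND PROOFS =====

-- clearing bit i on a nonnegative mask, in ℕ
def clN (m i : Nat) : Nat := Nat.ldiff m (2 ^ i)

theorem clI (m i : Nat) :
    Int.land (↑m) (Int.lnot ((1:Int) <<< (i:Int))) = ↑(clN m i) := by
  rw [Int.one_shiftLeft]; rfl

theorem tb_clN (m i k : Nat) :
    (clN m i).testBit k = (m.testBit k && !(decide (i = k))) := by
  simp [clN, Nat.testBit_ldiff, Nat.testBit_two_pow]

theorem clN_idem (m i : Nat) : clN (clN m i) i = clN m i := by
  apply Nat.eq_of_testBit_eq; intro k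
  simp [tb_clN]

theorem startMask (n : Nat) : ((1:Int) <<< (n:Int)) - 1 = ((2 ^ n - 1 : Nat) : Int) := by
  rw [Int.one_shiftLeft]
  push_cast [Nat.one_le_two_pow]
  ring

-- a fold of conditional bit-clears, bit by bit (Bool condition)
theorem tb_foldClearB (p : Nat → Bool) (L : List Nat) (m k : Nat) :
    (L.foldl (fun m i => cond (p i) (clN m i) m) m).testBit k
      = (m.testBit k && !(L.any (fun i => p i && decide (i = k)))) := by
  induction L generalizing m with
  | nil => simp
  | cons a L ih =>
    simp only [List.foldl_cons, List.any_cons]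
    cases hp : p a
    · simp [ih]
    · simp [ih, tb_clN, Bool.not_or, Bool.and_assoc]

-- a fold of conditional bit-clears, bit by bit (decidable Prop condition)
theorem tb_foldClear (p : Nat → Prop) [DecidablePred p] (L : List Nat) (m k : Nat) :
    (L.foldl (fun m i => if p i then clN m i else m) m).testBit k
      = (m.testBit k && !(L.any (fun i => decide (p i) && decide (i = k)))) := by
  induction L generalizing m with
  | nil => simp
  | cons a L ih =>
    simp only [List.foldl_cons, List.any_cons]
    by_cases hp : p a
    · simp [hp, ih, tb_clN, Bool.not_or, Bool.and_assoc]
    · simp [hp, ih]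

-- the inner loop of A over one row i, abstracted over the starting pair
theorem inner_fold (grid : List (List String)) (i : Nat) (js : List Nat) (r c : Nat) :
    (js.foldl (fun (rc : Int × Int) j =>
        if pvCell grid i j = "#" then
          (Int.land rc.1 (Int.lnot ((1:Int) <<< (i:Int))),
           Int.land rc.2 (Int.lnot ((1:Int) <<< (j:Int))))
        else rc) (↑r, ↑c))
      = (↑(cond (js.any (fun j => decide (pvCell grid i j = "#"))) (clN r i) r),
         ↑(js.foldl (fun c j => if pvCell grid i j = "#" then clN c j else c) c)) := by
  induction js generalizing r c with
  | nil => simp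
  | cons j js ih =>
    simp only [List.foldl_cons, List.any_cons]
    by_cases h : pvCell grid i j = "#"
    · rw [if_pos h, if_pos h]
      simp only [clI]
      rw [ih]
      simp only [h, decide_true, Bool.true_or, Bool.cond_true]
      cases ha : js.any (fun j => decide (pvCell grid i j = "#")) <;>
        simp [clN_idem]
    · rw [if_neg h, if_neg h, ih]
      simp [h]

-- the outer loop of A, abstracted over the starting pair
theorem outer_fold (grid : List (List String)) (nc : Nat) (is : List Nat) (r c : Nat) :
    (is.foldl (fun (rc : Int × Int) i =>
        (List.range nc).foldl (fun (rc : Int × Int) j =>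
          if pvCell grid i j = "#" then
            (Int.land rc.1 (Int.lnot ((1:Int) <<< (i:Int))),
             Int.land rc.2 (Int.lnot ((1:Int) <<< (j:Int))))
          else rc) rc) (↑r, ↑c))
      = (↑(is.foldl (fun r i =>
             cond ((List.range nc).any (fun j => decide (pvCell grid i j = "#"))) (clN r i) r) r),
         ↑(is.foldl (fun c i =>
             (List.range nc).foldl (fun c j => if pvCell grid i j = "#" then clN c j else c) c) c)) := by
  induction is generalizing r c with
  | nil => simp
  | cons i is ih =>
    simp only [List.foldl_cons]
    rw [inner_fold, ih]

theorem tb_foldCols (grid : List (List String)) (nc : Nat) (is : List Nat) (c k : Nat) :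
    (is.foldl (fun c i =>
        (List.range nc).foldl (fun c j => if pvCell grid i j = "#" then clN c j else c) c) c).testBit k
      = (c.testBit k &&
         !(is.any (fun i => (List.range nc).any
             (fun j => decide (pvCell grid i j = "#") && decide (j = k))))) := by
  induction is generalizing c with
  | nil => simp
  | cons i is ih =>
    simp only [List.foldl_cons, List.any_cons]
    rw [ih, tb_foldClear (fun j => pvCell grid i j = "#")]
    simp [Bool.not_or, Bool.and_assoc]

-- B's sum of shifted ones, in ℕ
theorem sum_shift (L : List Nat) (s : Nat) :
    ((L.map (fun i => (1:Int) <<< (Int.ofNat i))).foldl (· + ·) (Int.ofNat s))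
      = Int.ofNat (L.foldl (fun s i => s + 2 ^ i) s) := by
  induction L generalizing s with
  | nil => simp
  | cons a L ih =>
    simp only [List.map_cons, List.foldl_cons]
    have h1 : Int.ofNat s + (1:Int) <<< (Int.ofNat a) = Int.ofNat (s + 2 ^ a) := by
      simp only [Int.ofNat_eq_natCast]
      rw [Int.one_shiftLeft]
      push_cast
      ring
    rw [h1, ih]

theorem S_lt (q : Nat → Bool) (n : Nat) :
    ((List.range n).filter q).foldl (fun s i => s + 2 ^ i) 0 < 2 ^ n := by
  induction n with
  | zero => simp
  | succ n ih =>
    rw [List.range_succ, List.filter_append, List.foldl_append]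
    have h2 : (2:Nat) ^ (n+1) = 2 ^ n + 2 ^ n := by ring
    cases hq : q n
    · simp only [List.filter_cons, hq, Bool.false_eq_true, List.filter_nil,
        List.foldl_nil, reduceIte]
      omega
    · simp only [List.filter_cons, hq, if_pos, List.filter_nil, List.foldl_cons, List.foldl_nil]
      omega

-- bit k of B's accumulated sum over the kept indices of range n
theorem tb_S (q : Nat → Bool) (n k : Nat) :
    (((List.range n).filter q).foldl (fun s i => s + 2 ^ i) 0).testBit k
      = (decide (k < n) && q k) := by
  induction n with
  | zero => simp
  | succ n ih =>
    rw [List.range_succ, List.filter_append, List.foldl_append]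
    cases hq : q n
    · simp only [List.filter_cons, hq, Bool.false_eq_true, List.filter_nil,
        List.foldl_nil, reduceIte]
      rw [ih]
      by_cases hk : k = n
      · subst hk; simp [hq]
      · by_cases hk' : k < n
        · have h1 : k < n + 1 := by omega
          simp [hk', h1]
        · have h1 : ¬ k < n + 1 := by omega
          simp [hk', h1]
    · simp only [List.filter_cons, hq, if_pos, List.filter_nil, List.foldl_cons, List.foldl_nil]
      rw [Nat.add_comm]
      rcases Nat.lt_trichotomy k n with hk | hk | hk
      · rw [Nat.testBit_two_pow_add_gt hk, ih]
        have h2 : k < n + 1 := by omega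
        simp [hk, h2]
      · subst hk
        rw [Nat.testBit_two_pow_add_eq, ih]
        simp [hq]
      · have hlt : 2 ^ n + ((List.range n).filter q).foldl (fun s i => s + 2 ^ i) 0 < 2 ^ k := by
          have h1 := S_lt q n
          have h2 : (2:Nat) ^ (n+1) ≤ 2 ^ k := Nat.pow_le_pow_right (by norm_num) hk
          have h3 : (2:Nat) ^ (n+1) = 2 ^ n + 2 ^ n := by ring
          omega
        rw [Nat.testBit_lt_two_pow hlt]
        have h1 : ¬ k < n + 1 := by omega
        simp [h1]

theorem find_expansion_spec : Claim_equal_find_expansion := by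
  intro grid _ _
  unfold Spec_find_expansion
  simp only [find_expansion, find_expansion_alt]
  rw [startMask, startMask, outer_fold]
  rw [show (0:Int) = Int.ofNat 0 from rfl, sum_shift, sum_shift]
  rw [Prod.mk.injEq]
  constructor
  · rw [Int.ofNat_eq_natCast, Nat.cast_inj]
    apply Nat.eq_of_testBit_eq
    intro k
    rw [tb_foldClearB, tb_S, Nat.testBit_two_pow_sub_one]
    by_cases hk : k < grid.length
    · rw [Bool.eq_iff_iff]
      simp only [hk, decide_true, Bool.true_and, Bool.not_eq_true', List.any_eq_false,
        List.all_eq_true, List.any_eq_true, Bool.and_eq_true, decide_eq_true_eq,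
        List.mem_range, not_and, ne_eq]
      constructor
      · intro h j hj hc
        exact h k hk ⟨j, hj, hc⟩ rfl
      · intro h i _ hex hik
        obtain ⟨j, hj, hc⟩ := hex
        subst hik
        exact h j hj hc
    · simp [hk]
  · rw [Int.ofNat_eq_natCast, Nat.cast_inj]
    apply Nat.eq_of_testBit_eq
    intro k
    rw [tb_foldCols, tb_S, Nat.testBit_two_pow_sub_one]
    by_cases hk : k < (grid.headD []).length
    · rw [Bool.eq_iff_iff]
      simp only [hk, decide_true, Bool.true_and, Bool.not_eq_true', List.any_eq_false,
        List.all_eq_true, List.any_eq_true, Bool.and_eq_true, decide_eq_true_eq,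
        List.mem_range, ne_eq]
      constructor
      · intro h i hi hc
        exact h i hi ⟨k, hk, hc, rfl⟩
      · intro h i hi hex
        obtain ⟨j, hj, hc, hjk⟩ := hex
        subst hjk
        exact h i hi hc
    · have hk' : ¬ k < (grid.head?.getD []).length := by
        cases grid with
        | nil => exact hk
        | cons a l => exact hk
      simp [hk']
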